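-- pv_equiv track=rewrite | github.com/Timofejs-Rimensons/IntersectionAnalysisProject | services/TrafficFlowEstimator.py | _sum_series
-- ===== SOURCE A (Python) =====
-- def _sum_series(series_list):
--     if not series_list:
--         return []
--     max_len = max(len(s) for s in series_list)
--     out = [0] * max_len
--     for s in series_list:
--         for i, v in enumerate(s):
--             out[i] += v
--     return out
-- ===== SOURCE B (Python) =====
-- def _sum_series(series_list):
--     if not series_list:
--         return []
--     max_len = max(map(len, series_list))
--     return [sum(s[i] for s in series_list if i < len(s)) for i in range(max_len)]
-- ===== Notes on version B (the rewrite author's own statement) =====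
-- stated objective: alternative
-- what changed: B transposes the traversal: instead of A's per-series accumulation into a preallocated mutable output, B builds each output column directly as a comprehension over column indices, summing the entries of the series that are long enough.
import Mathlib
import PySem

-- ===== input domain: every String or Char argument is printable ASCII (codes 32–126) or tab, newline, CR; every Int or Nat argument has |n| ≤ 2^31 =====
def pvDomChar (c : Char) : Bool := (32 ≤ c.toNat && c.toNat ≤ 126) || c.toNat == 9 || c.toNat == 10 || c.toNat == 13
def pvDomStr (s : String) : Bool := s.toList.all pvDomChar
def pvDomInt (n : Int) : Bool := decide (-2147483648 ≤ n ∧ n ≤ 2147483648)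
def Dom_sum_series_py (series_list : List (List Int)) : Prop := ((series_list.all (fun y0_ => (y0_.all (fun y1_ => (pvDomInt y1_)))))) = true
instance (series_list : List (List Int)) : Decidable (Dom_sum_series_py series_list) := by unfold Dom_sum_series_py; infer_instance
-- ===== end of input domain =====

-- B changes the traversal order (per-column sums over the series, instead of A's
-- per-series accumulation into a preallocated output); alternative, not faster.

-- ===== PORT A =====
-- `for i, v in enumerate(s): out[i] += v`, as the obvious structural recursion over s carrying i
def pvAddLoop (out : List Int) (i : Nat) (s : List Int) : List Int :=
  match s with
  | [] => out
  | v :: rest => pvAddLoop (out.set i (out.getD i 0 + v)) (i + 1) rest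

def sum_series_py (series_list : List (List Int)) : List Int :=
  if series_list = [] then []
  else
    -- max(len(s) for s in series_list); the list is nonempty here, so fold max 0 over Nat lengths is exact
    let max_len := (series_list.map List.length).foldl max 0
    let out := List.replicate max_len (0 : Int)
    series_list.foldl (fun o s => pvAddLoop o 0 s) out

-- ===== PORT B =====
def sum_series_py_alt (series_list : List (List Int)) : List Int :=
  if series_list = [] then []
  else
    let max_len := (series_list.map List.length).foldl max 0
    -- [sum(s[i] for s in series_list if i < len(s)) for i in range(max_len)]
    (List.range max_len).map (fun i =>
      (((series_list.filter (fun s => i < s.length)).map (fun s => s.getD i 0)).sum))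

-- ===== PRECONDITION & SPEC =====
def Spec_sum_series_py (series_list : List (List Int)) (out : List Int) : Prop := out = sum_series_py_alt series_list
instance (series_list : List (List Int)) (out : List Int) : Decidable (Spec_sum_series_py series_list out) := by unfold Spec_sum_series_py; infer_instance

-- ===== CLAIM (what is proved, stated in full; the proofs are below) =====
def Claim_equal_sum_series_py : Prop := ∀ (series_list : List (List Int)), Dom_sum_series_py series_list → Spec_sum_series_py series_list (sum_series_py series_list)

-- ===== LEMMAS AND PROOFS =====

-- the sum of column j across all series (missing entries count as 0)
def pvColSum (ls : List (List Int)) (j : Nat) : Int := (ls.map (fun s => s.getD j 0)).sum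

theorem pv_le_foldl_max (xs : List Nat) (a : Nat) : a ≤ xs.foldl max a := by
  induction xs generalizing a with
  | nil => simp
  | cons x xs ih => exact le_trans (le_max_left a x) (by simpa using ih (max a x))

theorem pv_mem_le_foldl_max {x : Nat} {xs : List Nat} (h : x ∈ xs) (a : Nat) :
    x ≤ xs.foldl max a := by
  induction xs generalizing a with
  | nil => cases h
  | cons y ys ih =>
    rcases List.mem_cons.mp h with h | h
    · subst h; exact le_trans (le_max_right a x) (pv_le_foldl_max ys _)
    · simpa using ih h (max a y)

theorem pvAddLoop_length (s : List Int) : ∀ (out : List Int) (i : Nat),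
    (pvAddLoop out i s).length = out.length := by
  induction s with
  | nil => intro out i; simp [pvAddLoop]
  | cons v rest ih => intro out i; simp [pvAddLoop, ih]

theorem pvAddLoop_getD (s : List Int) : ∀ (out : List Int) (i j : Nat),
    i + s.length ≤ out.length →
    (pvAddLoop out i s).getD j 0 =
      out.getD j 0 + (if i ≤ j then s.getD (j - i) 0 else 0) := by
  induction s with
  | nil => intro out i j _; simp [pvAddLoop]
  | cons v rest ih =>
    intro out i j hlen
    have hi : i < out.length := by simp at hlen; omega
    rw [pvAddLoop, ih _ (i + 1) j (by simp at hlen ⊢; omega)]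
    have hset : ∀ k : Nat, (out.set i (out.getD i 0 + v)).getD k 0 =
        if k = i then out.getD i 0 + v else out.getD k 0 := by
      intro k
      by_cases hk : k = i
      · subst hk
        rw [if_pos rfl, List.getD_eq_getElem?_getD, List.getElem?_set_self]
        · simp
        · exact hi
      · rw [if_neg hk, List.getD_eq_getElem?_getD,
          List.getElem?_set_ne (fun h => hk h.symm), ← List.getD_eq_getElem?_getD]
    rw [hset j]
    rcases Nat.lt_trichotomy j i with h | h | h
    · rw [if_neg (by omega), if_neg (by omega), if_neg (by omega)]
    · subst h
      rw [if_pos rfl, if_neg (by omega), if_pos (le_refl j)]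
      simp
    · rw [if_neg (by omega), if_pos (by omega), if_pos (by omega)]
      have : j - i = (j - (i + 1)) + 1 := by omega
      rw [this]
      simp

theorem pv_fold_spec (ls : List (List Int)) : ∀ (out : List Int),
    (∀ s ∈ ls, s.length ≤ out.length) →
    (ls.foldl (fun o s => pvAddLoop o 0 s) out).length = out.length ∧
    ∀ j, (ls.foldl (fun o s => pvAddLoop o 0 s) out).getD j 0 = out.getD j 0 + pvColSum ls j := by
  induction ls with
  | nil => intro out _; simp [pvColSum]
  | cons s rest ih =>
    intro out h
    have hs : s.length ≤ out.length := h s (List.mem_cons_self ..)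
    have hlen := pvAddLoop_length s out 0
    obtain ⟨ihlen, ihget⟩ := ih (pvAddLoop out 0 s)
      (fun t ht => by rw [hlen]; exact h t (List.mem_cons_of_mem _ ht))
    refine ⟨by simp [List.foldl_cons, ihlen, hlen], fun j => ?_⟩
    rw [List.foldl_cons, ihget j, pvAddLoop_getD s out 0 j (by omega)]
    simp [pvColSum, add_assoc]

theorem pv_filter_sum (ls : List (List Int)) (j : Nat) :
    ((ls.filter (fun s => j < s.length)).map (fun s => s.getD j 0)).sum = pvColSum ls j := by
  induction ls with
  | nil => simp [pvColSum]
  | cons s rest ih =>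
    by_cases h : j < s.length
    · simp [pvColSum, h] at ih ⊢; simp [ih]
    · simp [pvColSum, h] at ih ⊢
      simp [ih]

-- ===== VERDICT (by name: the statement is the Claim_ definition above) =====
theorem sum_series_py_spec : Claim_equal_sum_series_py := by
  intro ls _
  unfold Spec_sum_series_py sum_series_py sum_series_py_alt
  by_cases hnil : ls = []
  · simp [hnil]
  · rw [if_neg hnil, if_neg hnil]
    set M := (ls.map List.length).foldl max 0 with hM
    have hbound : ∀ s ∈ ls, s.length ≤ (List.replicate M (0 : Int)).length := by
      intro s hs
      rw [List.length_replicate]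
      exact pv_mem_le_foldl_max (List.mem_map_of_mem hs) 0
    obtain ⟨hlen, hget⟩ := pv_fold_spec ls (List.replicate M (0 : Int)) hbound
    apply List.ext_getElem
    · simp [hlen]
    · intro i h1 h2
      have hiM : i < M := by simpa [hlen] using h1
      have hA : (ls.foldl (fun o s => pvAddLoop o 0 s) (List.replicate M (0 : Int)))[i] =
          (ls.foldl (fun o s => pvAddLoop o 0 s) (List.replicate M (0 : Int))).getD i 0 :=
        (List.getD_eq_getElem _ _ h1).symm
      rw [hA, hget i, ← pv_filter_sum ls i]
      simp [List.getD_eq_getElem?_getD, hiM]
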